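-- pv_equiv track=rewrite | github.com/CRezelman/AdventOfCode | 2023/Day14.py | findHighestNumber
-- ===== SOURCE A (Python) =====
-- def findHighestNumber(column: list[int], target: int):
--     validNumbers = [num for num in column if num > target]
--
--     if validNumbers:
--         highest_number = max(validNumbers)
--         column.remove(highest_number)
--         return highest_number
--     else:
--         return None
-- ===== SOURCE B (Python) =====
-- def findHighestNumber(column: list[int], target: int):
--     # One fused pass: track the best value strictly above target and the
--     # index of its first occurrence; delete by index (same element A removes).
--     best = None
--     best_idx = -1
--     for i, num in enumerate(column):
--         if num > target and (best is None or num > best):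
--             best = num
--             best_idx = i
--     if best is None:
--         return None
--     del column[best_idx]
--     return best
-- ===== Notes on version B (the rewrite author's own statement) =====
-- stated objective: simpler
-- what changed: Replaced A's three passes (filter comprehension, max, list.remove) with one fused scan that tracks the best value strictly above target and the index of its first occurrence, deleting by index.
import Mathlib
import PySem

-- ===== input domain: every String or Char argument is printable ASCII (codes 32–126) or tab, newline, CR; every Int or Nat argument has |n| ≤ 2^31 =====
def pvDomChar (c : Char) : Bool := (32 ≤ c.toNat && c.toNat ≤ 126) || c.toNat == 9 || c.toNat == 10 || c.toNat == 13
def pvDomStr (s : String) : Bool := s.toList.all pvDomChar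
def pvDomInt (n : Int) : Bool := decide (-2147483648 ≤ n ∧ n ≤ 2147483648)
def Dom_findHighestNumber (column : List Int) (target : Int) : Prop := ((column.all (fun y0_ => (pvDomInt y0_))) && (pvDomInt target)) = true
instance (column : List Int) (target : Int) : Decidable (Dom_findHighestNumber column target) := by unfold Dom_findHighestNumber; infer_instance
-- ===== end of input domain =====

-- B fuses A's three passes (filter, max, remove) into one scan tracking the best value
-- and its first index; equivalence is about the RETURN value (both Pythons also delete
-- the same element from `column`). Objective: simpler.

-- ===== PORT A =====
def findHighestNumber (column : List Int) (target : Int) : Option Int :=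
  let validNumbers := column.filter (fun num => decide (num > target))
  if validNumbers.isEmpty then none
  else PySem.List.max? validNumbers (fun x => x)

-- ===== PORT B =====
-- one step of B's loop: keep `num` if it is above target and strictly beats the best so far
def altStep (target : Int) (best : Option Int) (num : Int) : Option Int :=
  if num > target && (match best with | none => true | some b => num > b) then some num else best

def findHighestNumber_alt (column : List Int) (target : Int) : Option Int :=
  column.foldl (altStep target) none

-- ===== PRECONDITION & SPEC =====
def Spec_findHighestNumber (column : List Int) (target : Int) (out : Option Int) : Prop := out = findHighestNumber_alt column target
instance (column : List Int) (target : Int) (out : Option Int) : Decidable (Spec_findHighestNumber column target out) := by unfold Spec_findHighestNumber; infer_instance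

-- ===== CLAIM (what is proved, stated in full; the proofs are below) =====
def Claim_equal_findHighestNumber : Prop := ∀ (column : List Int) (target : Int), Dom_findHighestNumber column target → Spec_findHighestNumber column target (findHighestNumber column target)

-- ===== LEMMAS AND PROOFS =====

theorem altStep_some (t : Int) (l : List Int) : ∀ (b : Int), t < b →
    l.foldl (altStep t) (some b) = some ((l.filter (fun x => decide (x > t))).foldl max b) := by
  induction l with
  | nil => intro b _; simp
  | cons a l ih =>
    intro b hb
    by_cases hat : a > t
    · by_cases hab : a > b
      · have h1 : altStep t (some b) a = some a := by simp [altStep, hat, hab]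
        rw [List.foldl_cons, h1, ih a hat]
        simp [hat, max_eq_right hab.le]
      · have h1 : altStep t (some b) a = some b := by simp [altStep, hab]
        rw [List.foldl_cons, h1, ih b hb]
        simp [hat, max_eq_left (le_of_not_gt hab)]
    · have h1 : altStep t (some b) a = some b := by simp [altStep, hat]
      rw [List.foldl_cons, h1, ih b hb]
      simp [hat]

theorem altLoop_none (t : Int) (l : List Int) :
    l.foldl (altStep t) none =
      match l.filter (fun x => decide (x > t)) with
      | [] => none
      | x :: tl => some (tl.foldl max x) := by
  induction l with
  | nil => simp
  | cons a l ih =>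
    by_cases hat : a > t
    · have h1 : altStep t none a = some a := by simp [altStep, hat]
      rw [List.foldl_cons, h1]
      simp only [List.filter_cons, decide_eq_true hat, if_pos trivial]
      exact altStep_some t l a hat
    · have h1 : altStep t none a = none := by simp [altStep, hat]
      rw [List.foldl_cons, h1]
      simpa [List.filter_cons, hat] using ih

-- ===== VERDICT (by name: the statement is the Claim_ definition above) =====
theorem findHighestNumber_spec : Claim_equal_findHighestNumber := by
  intro column target _
  unfold Spec_findHighestNumber findHighestNumber findHighestNumber_alt
  rw [altLoop_none]
  cases h : column.filter (fun x => decide (x > target)) with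
  | nil => simp
  | cons x tl => simp [PySem.List.max?_id_cons]
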